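-- pv_equiv track=rewrite | github.com/htang7415/Code-Lab | modules/databases/indexing/jsonb-and-gin-indexing/python/jsonb_and_gin_indexing.py | filter_documents_with_index
-- ===== SOURCE A (Python) =====
-- def filter_documents_with_index(
--     inverted_index: dict[str, set[str]],
--     required_terms: list[str],
-- ) -> list[str]:
--     if not required_terms:
--         return []
--     postings = [inverted_index.get(term, set()) for term in required_terms]
--     if not postings:
--         return []
--     return sorted(set.intersection(*postings))
-- ===== SOURCE B (Python) =====
-- def filter_documents_with_index(
--     inverted_index: dict[str, set[str]],
--     required_terms: list[str],
-- ) -> list[str]: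
--     if not required_terms:
--         return []
--     counts = {}
--     for term in required_terms:
--         for doc in inverted_index.get(term, set()):
--             counts[doc] = counts.get(doc, 0) + 1
--     need = len(required_terms)
--     return sorted(doc for doc, c in counts.items() if c == need)
-- ===== Notes on version B (the rewrite author's own statement) =====
-- stated objective: alternative
-- what changed: B never intersects sets: it makes one merged counting pass building a doc->count histogram over all posting sets and keeps exactly the docs whose count equals the number of required terms (correct because each posting is a set, so a doc's count equals the number of terms whose postings contain it), then sorts.
import Mathlib
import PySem

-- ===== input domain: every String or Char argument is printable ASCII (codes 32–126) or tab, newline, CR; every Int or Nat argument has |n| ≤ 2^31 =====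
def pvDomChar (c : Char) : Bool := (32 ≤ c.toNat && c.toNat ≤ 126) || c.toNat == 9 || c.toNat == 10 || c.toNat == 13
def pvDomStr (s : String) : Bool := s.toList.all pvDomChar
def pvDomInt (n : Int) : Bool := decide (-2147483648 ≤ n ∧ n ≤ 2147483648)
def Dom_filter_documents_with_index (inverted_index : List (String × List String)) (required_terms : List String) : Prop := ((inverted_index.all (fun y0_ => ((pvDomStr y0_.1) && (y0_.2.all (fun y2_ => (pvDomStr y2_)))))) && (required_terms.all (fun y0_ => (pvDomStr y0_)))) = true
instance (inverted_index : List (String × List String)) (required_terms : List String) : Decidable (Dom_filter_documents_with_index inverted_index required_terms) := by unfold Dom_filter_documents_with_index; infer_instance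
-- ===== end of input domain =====

-- B replaces the set-intersection fold by a single merged counting pass: a doc→count
-- histogram over all posting sets, keeping docs whose count equals len(required_terms) (objective: alternative).

-- ===== PORT A =====
def filter_documents_with_index (inverted_index : List (String × List String)) (required_terms : List String) : List String :=
  if required_terms.isEmpty then []
  else
    let postings := required_terms.map (fun t => PySem.Dict.getD (PySem.Dict.mk inverted_index) t [])
    if postings.isEmpty then []
    else
      -- set.intersection(*postings): elements of the first set lying in every other
      PySem.List.sorted
        (List.foldl (fun acc s => acc.filter (fun x => s.contains x)) (postings.headD []) postings.tail)
        (fun x => x) false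

-- ===== PORT B =====
def filter_documents_with_index_alt (inverted_index : List (String × List String)) (required_terms : List String) : List String :=
  match required_terms with
  | [] => []
  | _ :: _ =>
    let idx := PySem.Dict.mk inverted_index
    let counts : PySem.Dict String Int :=
      required_terms.foldl
        (fun c term =>
          (PySem.Dict.getD idx term []).foldl
            (fun c doc => c.insert doc (c.getD doc 0 + 1)) c)
        PySem.Dict.empty
    let need : Int := required_terms.length
    PySem.List.sorted
      ((counts.items.filter (fun p => p.2 == need)).map Prod.fst)
      (fun x => x) false

-- ===== PRECONDITION & SPEC =====
-- Pre_ requires every posting list to have no duplicates: the Python values are SETS, so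
-- under the type convention (set → list of DISTINCT elements) lists with duplicates
-- represent no Python input; B's counting pass is only set-faithful on distinct postings.
def Pre_filter_documents_with_index (inverted_index : List (String × List String)) (_required_terms : List String) : Prop :=
  ∀ p ∈ inverted_index, p.2.Nodup
instance (inverted_index : List (String × List String)) (required_terms : List String) : Decidable (Pre_filter_documents_with_index inverted_index required_terms) := by unfold Pre_filter_documents_with_index; infer_instance

def pvWitness_filter_documents_with_index : (List (String × List String)) × List String :=
  ([("a", ["d1", "d2"]), ("b", ["d2", "d3"])], ["a", "b"])

def Spec_filter_documents_with_index (inverted_index : List (String × List String)) (required_terms : List String) (out : List String) : Prop := out = filter_documents_with_index_alt inverted_index required_terms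
instance (inverted_index : List (String × List String)) (required_terms : List String) (out : List String) : Decidable (Spec_filter_documents_with_index inverted_index required_terms out) := by unfold Spec_filter_documents_with_index; infer_instance

-- ===== CLAIM =====
def Claim_equal_filter_documents_with_index : Prop := ∀ (inverted_index : List (String × List String)) (required_terms : List String), Dom_filter_documents_with_index inverted_index required_terms → Pre_filter_documents_with_index inverted_index required_terms → Spec_filter_documents_with_index inverted_index required_terms (filter_documents_with_index inverted_index required_terms)

-- ===== LEMMAS AND PROOFS =====

-- folding pairwise filters equals one filter with the conjunction of memberships
theorem foldl_filter_contains (l : List (List String)) (s0 : List String) :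
    List.foldl (fun acc s => acc.filter (fun x => s.contains x)) s0 l
      = s0.filter (fun x => l.all (fun s => s.contains x)) := by
  induction l generalizing s0 with
  | nil => simp
  | cons p ps ih =>
      simp only [List.foldl_cons, ih, List.filter_filter, List.all_cons]
      congr 1
      funext x
      exact Bool.and_comm _ _

-- every posting list looked up from a duplicate-free index is duplicate-free
theorem posting_nodup (ii : List (String × List String))
    (h : ∀ p ∈ ii, p.2.Nodup) (t : String) :
    (PySem.Dict.getD (PySem.Dict.mk ii) t []).Nodup := by
  rcases hg : (PySem.Dict.mk ii).get? t with _ | v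
  · rw [PySem.Dict.getD_of_get?_eq_none _ _ hg]; exact List.nodup_nil
  · rw [PySem.Dict.getD_of_get?_eq_some _ _ hg]
    exact h (t, v) (PySem.Dict.mem_items_of_get?_eq_some _ hg)

-- the count stored for d after the merged pass = number of terms whose posting contains d
theorem getD_double_fold (P : String → List String) (hP : ∀ t, (P t).Nodup)
    (ts : List String) (c : PySem.Dict String Int) (d : String) :
    (ts.foldl (fun c t => (P t).foldl (fun c doc => c.insert doc (c.getD doc 0 + 1)) c) c).getD d 0
      = c.getD d 0 + (ts.countP (fun t => (P t).contains d) : Int) := by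
  induction ts generalizing c with
  | nil => simp
  | cons t ts ih =>
      simp only [List.foldl_cons, ih, PySem.Dict.getD_foldl_insert_add_one, List.countP_cons]
      have hcount : (List.count d (P t) : Int) = if (P t).contains d then 1 else 0 := by
        by_cases hm : d ∈ P t
        · simp [List.count_eq_one_of_mem (hP t) hm, hm]
        · simp [List.count_eq_zero_of_not_mem hm, hm]
      rw [hcount]
      split_ifs with h <;> simp <;> ring

-- keys stay duplicate-free through the nested insert loops
theorem keys_double_fold_nodup (P : String → List String)
    (ts : List String) (c : PySem.Dict String Int) (h : c.keys.Nodup) :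
    (ts.foldl (fun c t => (P t).foldl (fun c doc => c.insert doc (c.getD doc 0 + 1)) c) c).keys.Nodup := by
  induction ts generalizing c with
  | nil => exact h
  | cons t ts ih => exact ih _ (PySem.Dict.nodup_keys_foldl_insert _ _ _ h)

-- the heart of the equivalence, stated over an abstract posting function P
theorem counting_eq_intersection (P : String → List String) (hP : ∀ t, (P t).Nodup)
    (t0 : String) (rest : List String) :
    PySem.List.sorted
        ((P t0).filter (fun x => (rest.map P).all (fun s => s.contains x)))
        (fun x => x) false
      = PySem.List.sorted
          (((((t0 :: rest).foldl
                (fun c term => (P term).foldl (fun c doc => c.insert doc (c.getD doc 0 + 1)) c)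
                (PySem.Dict.empty : PySem.Dict String Int)).items).filter
              (fun p => p.2 == (((t0 :: rest).length : Nat) : Int))).map Prod.fst)
          (fun x => x) false := by
  have hnd : ((t0 :: rest).foldl
      (fun c term => (P term).foldl (fun c doc => c.insert doc (c.getD doc 0 + 1)) c)
      (PySem.Dict.empty : PySem.Dict String Int)).keys.Nodup :=
    keys_double_fold_nodup P _ _ PySem.Dict.nodup_keys_empty
  have hgetD := fun d => getD_double_fold P hP (t0 :: rest) PySem.Dict.empty d
  simp only [PySem.Dict.getD_empty, zero_add] at hgetD
  rw [PySem.Dict.items_eq_map_keys _ hnd 0, List.filter_map, List.map_map]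
  apply (PySem.List.sorted_id_eq_sorted_id_iff_perm _ _).mpr
  simp only [Function.comp_def, List.map_id']
  apply (List.perm_ext_iff_of_nodup ((hP t0).filter _) (hnd.filter _)).mpr
  intro x
  simp only [List.mem_filter, List.all_map, List.all_eq_true, beq_iff_eq]
  constructor
  · rintro ⟨hx0, hall⟩
    have hcnt : (t0 :: rest).countP (fun t => (P t).contains x) = (t0 :: rest).length := by
      apply List.countP_eq_length.mpr
      intro t ht
      rcases List.mem_cons.mp ht with h | h
      · subst h; exact List.elem_iff.mpr hx0
      · exact hall t h
    have hx0' : ((t0 :: rest).foldl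
        (fun c term => (P term).foldl (fun c doc => c.insert doc (c.getD doc 0 + 1)) c)
        (PySem.Dict.empty : PySem.Dict String Int)).getD x 0 ≠ 0 := by
      rw [hgetD, hcnt]; simp; omega
    refine ⟨?_, by rw [hgetD, hcnt]⟩
    by_contra hk
    exact hx0' (PySem.Dict.getD_of_not_contains _ _
      (by simp only [Bool.eq_false_iff, ne_eq, PySem.Dict.contains_iff_mem_keys]; exact hk))
  · rintro ⟨hk, hc⟩
    rw [hgetD] at hc
    have hall := List.countP_eq_length.mp (by exact_mod_cast hc)
    refine ⟨?_, fun t ht => hall t (List.mem_cons_of_mem _ ht)⟩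
    simpa [List.elem_iff] using hall t0 (List.mem_cons_self ..)

theorem filter_documents_with_index_spec : Claim_equal_filter_documents_with_index := by
  intro ii ts _ hpre
  unfold Spec_filter_documents_with_index filter_documents_with_index filter_documents_with_index_alt
  cases ts with
  | nil => simp
  | cons t0 rest =>
      simp only [List.isEmpty_cons, if_neg Bool.false_ne_true, List.map_cons, List.headD_cons,
        List.tail_cons, foldl_filter_contains]
      exact counting_eq_intersection
        (fun t => PySem.Dict.getD (PySem.Dict.mk ii) t []) (posting_nodup ii hpre) t0 rest
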